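-- pv_equiv track=rewrite | github.com/appu554/cardiofit_2026 | backend/shared-infrastructure/knowledge-base-services/kb-7-terminology/scripts/validate_kb_codes.py | _resolve_icd10
-- ===== SOURCE A (Python) =====
-- def _normalize_icd10(code: str) -> str:
--     """Strip dots and uppercase an ICD-10 code.
--
--     'E10.10' -> 'E1010', 'E10' -> 'E10', ' D50.0 ' -> 'D500'.
--     Used to bridge WHO ICD-10 (dotted) vs ICD-10-CM (dotless billable) — see
--     claudedocs/audits/2026-04-29_kb_cross_reference_gap_report.md §"Format mismatch".
--     """
--     return (code or "").replace(".", "").strip().upper()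
--
-- def _resolve_icd10(consumer_codes: set[str], ref_codes: set[str]) -> tuple[set[str], set[str]]:
--     """Match WHO ICD-10 consumer codes against ICD-10-CM reference codes.
--
--     KB-7 holds ICD-10-CM (dotless, billable 5-char like 'E1010').
--     KB-4 START_V3 holds WHO ICD-10 (dotted, often 3-char rollup like 'E10').
--
--     A consumer code is resolved if:
--       (a) its dotless form is an exact match in the reference set, OR
--       (b) it's a 3- or 4-character rollup AND any reference code starts
--           with that dotless prefix (e.g. 'E10' resolves because 'E1010',
--           'E1011', etc. exist in the reference set).
--
--     Returns (resolved_set, unresolved_set) using ORIGINAL consumer-code form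
--     so the report retains the source-faithful spelling.
--     """
--     import bisect
--     ref_norm = {_normalize_icd10(c) for c in ref_codes if c}
--     ref_sorted = sorted(ref_norm)
--     resolved: set[str] = set()
--     for code in consumer_codes:
--         norm = _normalize_icd10(code)
--         if not norm:
--             continue
--         if norm in ref_norm:
--             resolved.add(code)
--             continue
--         # Rollup match: only for short codes (3-4 dotless chars)
--         if 3 <= len(norm) <= 4:
--             i = bisect.bisect_left(ref_sorted, norm)
--             if i < len(ref_sorted) and ref_sorted[i].startswith(norm):
--                 resolved.add(code)
--     return resolved, consumer_codes - resolved
-- ===== SOURCE B (Python) =====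
-- def _normalize_icd10(code: str) -> str:
--     return (code or "").replace(".", "").strip().upper()
--
-- def _resolve_icd10(consumer_codes: set, ref_codes: set):
--     # Index-based rollup: precompute the 3- and 4-char prefixes of every
--     # reference code once, so each rollup lookup is a plain set membership
--     # test instead of a sort + binary search (no sorted index needed).
--     ref_norm = {_normalize_icd10(c) for c in ref_codes if c}
--     pref3 = {r[:3] for r in ref_norm}
--     pref4 = {r[:4] for r in ref_norm}
--     resolved = set()
--     for code in consumer_codes:
--         norm = _normalize_icd10(code)
--         if norm and (norm in ref_norm
--                      or (len(norm) == 3 and norm in pref3)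
--                      or (len(norm) == 4 and norm in pref4)):
--             resolved.add(code)
--     return resolved, consumer_codes - resolved
-- ===== Notes on version B (the rewrite author's own statement) =====
-- stated objective: alternative
-- what changed: Replaces A's per-call sort of the reference set plus bisect_left binary search for the 3-4 char rollup lookup with a hash set of the 3- and 4-char prefixes of the reference codes built once, so each rollup resolves by a single set membership test; it trades the sorted index for two precomputed prefix sets.
import Mathlib
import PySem

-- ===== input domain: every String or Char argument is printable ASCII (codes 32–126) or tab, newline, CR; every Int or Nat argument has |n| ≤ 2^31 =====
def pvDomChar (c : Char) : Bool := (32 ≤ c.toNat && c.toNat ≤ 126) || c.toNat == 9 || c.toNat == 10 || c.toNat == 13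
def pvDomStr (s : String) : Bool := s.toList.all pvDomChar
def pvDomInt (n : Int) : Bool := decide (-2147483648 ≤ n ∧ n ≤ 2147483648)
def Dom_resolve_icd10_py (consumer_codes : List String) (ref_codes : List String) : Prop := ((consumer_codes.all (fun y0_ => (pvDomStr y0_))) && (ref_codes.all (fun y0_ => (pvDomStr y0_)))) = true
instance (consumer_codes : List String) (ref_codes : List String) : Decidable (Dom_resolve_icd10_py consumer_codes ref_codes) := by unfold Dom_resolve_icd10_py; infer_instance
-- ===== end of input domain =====

-- B replaces A's per-call sort + bisect_left rollup lookup by hash sets of the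
-- 3-/4-char prefixes of the reference codes, built once (alternative algorithm).
-- Outputs are Python sets; both ports build them in first-occurrence order of the
-- (deduplicated) input lists.

-- ===== PORT A =====
-- shared module helper _normalize_icd10
def pvNormalize (code : String) : String :=
  PySem.Str.upper (PySem.Str.strip (PySem.Str.replace code "." ""))

def resolve_icd10_py (consumer_codes : List String) (ref_codes : List String) : List String × List String :=
  let refNorm : PySem.Set String :=
    PySem.Set.ofList (((PySem.Set.ofList ref_codes).filter (fun c => !(c == ""))).map pvNormalize)
  let refSorted : List String := PySem.List.sorted refNorm (fun x => x) false
  let consumer : PySem.Set String := PySem.Set.ofList consumer_codes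
  let resolved : PySem.Set String :=
    consumer.foldl (fun acc code =>
      let norm := pvNormalize code
      if norm == "" then acc
      else if PySem.Set.contains refNorm norm then PySem.Set.add acc code
      else if 3 ≤ PySem.Str.len norm ∧ PySem.Str.len norm ≤ 4 then
        let i := PySem.List.bisectLeft refSorted norm
        if h : i < refSorted.length then
          if PySem.Str.startswith refSorted[i] norm then PySem.Set.add acc code else acc
        else acc
      else acc) PySem.Set.empty
  (resolved, PySem.Set.diff consumer resolved)

-- ===== PORT B =====
def resolve_icd10_py_alt (consumer_codes : List String) (ref_codes : List String) : List String × List String :=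
  let refNorm : PySem.Set String :=
    PySem.Set.ofList (((PySem.Set.ofList ref_codes).filter (fun c => !(c == ""))).map pvNormalize)
  let pref3 : PySem.Set String :=
    PySem.Set.ofList (refNorm.map (fun r => PySem.Str.slice r none (some 3)))
  let pref4 : PySem.Set String :=
    PySem.Set.ofList (refNorm.map (fun r => PySem.Str.slice r none (some 4)))
  let consumer : PySem.Set String := PySem.Set.ofList consumer_codes
  let resolved : PySem.Set String :=
    consumer.foldl (fun acc code =>
      let norm := pvNormalize code
      if !(norm == "") &&
          (PySem.Set.contains refNorm norm
           || (PySem.Str.len norm == 3 && PySem.Set.contains pref3 norm)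
           || (PySem.Str.len norm == 4 && PySem.Set.contains pref4 norm)) then
        PySem.Set.add acc code
      else acc) PySem.Set.empty
  (resolved, PySem.Set.diff consumer resolved)

-- ===== PRECONDITION & SPEC =====
def Spec_resolve_icd10_py (consumer_codes : List String) (ref_codes : List String) (out : List String × List String) : Prop := out = resolve_icd10_py_alt consumer_codes ref_codes
instance (consumer_codes : List String) (ref_codes : List String) (out : List String × List String) : Decidable (Spec_resolve_icd10_py consumer_codes ref_codes out) := by unfold Spec_resolve_icd10_py; infer_instance

-- ===== CLAIM (what is proved, stated in full; the proofs are below) =====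
def Claim_equal_resolve_icd10_py : Prop := ∀ (consumer_codes : List String) (ref_codes : List String), Dom_resolve_icd10_py consumer_codes ref_codes → Spec_resolve_icd10_py consumer_codes ref_codes (resolve_icd10_py consumer_codes ref_codes)

-- ===== LEMMAS AND PROOFS =====

-- lexicographic-order facts about strings (Python's str '<' is Lean's '<')
theorem pvLexPrefix : ∀ (p m r : List Char), List.Lex (· < ·) p m → m ≤ r → p <+: r → p <+: m := by
  intro p
  induction p with
  | nil => intro m r _ _ _; exact List.nil_prefix
  | cons a t ih =>
    intro m r hpm hmr hpr
    rcases hpr with ⟨u, rfl⟩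
    cases hpm with
    | rel h =>
      exfalso
      rcases lt_or_eq_of_le hmr with hlt | heq
      · have hlex : List.Lex (· < ·) _ _ := hlt
        cases hlex with
        | rel h2 => exact absurd (h.trans h2) (lt_irrefl _)
        | cons h2 => exact absurd h (lt_irrefl _)
      · rcases List.cons.inj heq with ⟨rfl, -⟩
        exact absurd h (lt_irrefl _)
    | cons h =>
      rename_i mt
      rcases lt_or_eq_of_le hmr with hlt | heq
      · have hlex : List.Lex (· < ·) (a :: mt) (a :: (t ++ u)) := hlt
        cases hlex with
        | rel h2 => exact absurd h2 (lt_irrefl _)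
        | cons h2 =>
          exact List.cons_prefix_cons.mpr ⟨rfl, ih mt (t ++ u) h (le_of_lt h2) ⟨u, rfl⟩⟩
      · rcases List.cons.inj heq with ⟨-, rfl⟩
        exact ⟨u, rfl⟩

-- a string between a prefix-carrier's lower bound and the carrier keeps the prefix
theorem pvStrSandwich (p m r : String) (hpm : p ≤ m) (hmr : m ≤ r)
    (hpr : p.toList <+: r.toList) : p.toList <+: m.toList := by
  rw [String.le_iff_toList_le] at hpm hmr
  rcases lt_or_eq_of_le hpm with hlt | heq
  · exact pvLexPrefix _ _ _ hlt hmr hpr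
  · rw [heq]

theorem pvListLeAppend : ∀ (l u : List Char), l ≤ l ++ u := by
  intro l
  induction l with
  | nil =>
    intro u
    cases u with
    | nil => exact le_refl _
    | cons b v => exact le_of_lt (List.Lex.nil)
  | cons a t ih => intro u; exact List.cons_le_cons a (ih u)

theorem pvStrPrefixLe (p s : String) (h : p.toList <+: s.toList) : p ≤ s := by
  rw [String.le_iff_toList_le]
  rcases h with ⟨u, hu⟩
  rw [← hu]
  exact pvListLeAppend _ u

-- bisect_left's loop on a sorted list of strings: everything left of the result is < x,
-- everything from the result on is ≥ x
theorem pvBisectLoopSpec (xs : List String) (x : String) :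
    ∀ (fuel lo hi : Nat), lo ≤ hi → hi ≤ xs.length → hi - lo ≤ fuel →
    List.Pairwise (· ≤ ·) xs →
    (∀ j (hj : j < xs.length), j < lo → xs[j] < x) →
    (∀ j (hj : j < xs.length), hi ≤ j → x ≤ xs[j]) →
    PySem.List.bisectLeftLoop xs x fuel lo hi ≤ xs.length ∧
    (∀ j (hj : j < xs.length), j < PySem.List.bisectLeftLoop xs x fuel lo hi → xs[j] < x) ∧
    (∀ j (hj : j < xs.length), PySem.List.bisectLeftLoop xs x fuel lo hi ≤ j → x ≤ xs[j]) := by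
  intro fuel
  induction fuel with
  | zero =>
    intro lo hi h1 h2 h3 hp hlow hhigh
    have : lo = hi := by omega
    subst this
    simp only [PySem.List.bisectLeftLoop]
    exact ⟨by omega, hlow, hhigh⟩
  | succ n ih =>
    intro lo hi h1 h2 h3 hp hlow hhigh
    by_cases hlt : lo < hi
    · have hmid : (lo + hi) / 2 < xs.length := by omega
      have hmono : ∀ p q (hpq : p ≤ q) (hq : q < xs.length), xs[p]'(Nat.lt_of_le_of_lt hpq hq) ≤ xs[q] := by
        intro p q hpq hq
        rcases eq_or_lt_of_le hpq with rfl | hlt2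
        · exact le_refl _
        · exact (List.pairwise_iff_getElem.mp hp) p q (by omega) hq hlt2
      rw [PySem.List.bisectLeftLoop]
      simp only [hlt, if_true, List.getElem?_eq_getElem hmid]
      by_cases hcmp : xs[(lo + hi) / 2] < x
      · simp only [hcmp, if_true]
        exact ih ((lo + hi) / 2 + 1) hi (by omega) h2 (by omega) hp
          (fun j hj hjlt => lt_of_le_of_lt (hmono j ((lo+hi)/2) (by omega) hmid) hcmp)
          hhigh
      · simp only [hcmp, if_false]
        exact ih lo ((lo + hi) / 2) (by omega) (by omega) (by omega) hp hlow
          (fun j hj hjge => le_trans (not_lt.mp hcmp) (hmono ((lo+hi)/2) j hjge hj))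
    · have : lo = hi := by omega
      subst this
      rw [PySem.List.bisectLeftLoop]
      simp only [hlt, if_false]
      exact ⟨by omega, hlow, hhigh⟩

theorem pvBisectSpec (xs : List String) (x : String) (hp : List.Pairwise (· ≤ ·) xs) :
    PySem.List.bisectLeft xs x ≤ xs.length ∧
    (∀ j (hj : j < xs.length), j < PySem.List.bisectLeft xs x → xs[j] < x) ∧
    (∀ j (hj : j < xs.length), PySem.List.bisectLeft xs x ≤ j → x ≤ xs[j]) := by
  unfold PySem.List.bisectLeft
  exact pvBisectLoopSpec xs x xs.length 0 xs.length (by omega) (le_refl _) (by omega) hp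
    (fun j hj h => absurd h (by omega)) (fun j hj h => absurd h (by omega))

-- A's rollup test (bisect_left into sorted(refNorm), then startswith) hits iff some
-- reference code has norm as a prefix
theorem pvHitA_iff (refNorm : List String) (norm : String) :
    (∃ h : PySem.List.bisectLeft (PySem.List.sorted refNorm (fun x => x) false) norm <
            (PySem.List.sorted refNorm (fun x => x) false).length,
        PySem.Str.startswith
          ((PySem.List.sorted refNorm (fun x => x) false)[PySem.List.bisectLeft (PySem.List.sorted refNorm (fun x => x) false) norm]'h)
          norm = true)
    ↔ ∃ r ∈ refNorm, norm.toList <+: r.toList := by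
  have hp : List.Pairwise (· ≤ ·) (PySem.List.sorted refNorm (fun x => x) false) := by
    simpa using PySem.List.sorted_pairwise refNorm (fun x => x)
  set S := PySem.List.sorted refNorm (fun x => x) false with hS
  obtain ⟨hle, hlt, hge⟩ := pvBisectSpec S norm hp
  set i := PySem.List.bisectLeft S norm with hi
  constructor
  · rintro ⟨h, hsw⟩
    refine ⟨S[i], ?_, ?_⟩
    · exact (PySem.List.mem_sorted refNorm (fun x => x) false _).mp (List.getElem_mem h)
    · rw [PySem.Str.startswith_eq] at hsw
      exact (PySem.Chars.startswith_iff _ _).mp hsw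
  · rintro ⟨r, hr, hpre⟩
    have hrS : r ∈ S := (PySem.List.mem_sorted refNorm (fun x => x) false r).mpr hr
    obtain ⟨jr, hjr, rfl⟩ := List.getElem_of_mem hrS
    have hnr : norm ≤ S[jr] := pvStrPrefixLe _ _ hpre
    have hij : i ≤ jr := by
      by_contra hlt2
      exact absurd hnr (not_le.mpr (hlt jr hjr (by omega)))
    have h : i < S.length := by omega
    refine ⟨h, ?_⟩
    have h1 : norm ≤ S[i] := hge i h (le_refl i)
    have h2 : S[i] ≤ S[jr] := by
      rcases eq_or_lt_of_le hij with heq | hlt2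
      · simp [heq]
      · exact (List.pairwise_iff_getElem.mp hp) i jr h hjr hlt2
    rw [PySem.Str.startswith_eq]
    exact (PySem.Chars.startswith_iff _ _).mpr (pvStrSandwich norm S[i] S[jr] h1 h2 hpre)

-- B's rollup test (membership in the precomputed k-char prefix set) hits iff some
-- reference code has norm as a prefix (for norm of length exactly k)
theorem pvMemPref_iff (refNorm : List String) (norm : String) (k : Int) (hk0 : 0 ≤ k)
    (hk : (norm.toList.length : Int) = k) :
    (PySem.Set.contains
        (PySem.Set.ofList (refNorm.map (fun r => PySem.Str.slice r none (some k)))) norm = true)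
    ↔ ∃ r ∈ refNorm, norm.toList <+: r.toList := by
  have hmem : ∀ (l : List String) (y : String),
      PySem.Set.contains (PySem.Set.ofList l) y = true ↔ y ∈ l := by
    intro l y
    simp [PySem.Set.contains, PySem.Set.mem_ofList]
  rw [hmem, List.mem_map]
  constructor
  · rintro ⟨r, hr, heq⟩
    refine ⟨r, hr, ?_⟩
    have hkN : norm.toList.length = k.toNat := by omega
    have : (PySem.Str.slice r none (some k)).toList = norm.toList := by rw [heq]
    rw [PySem.Str.toList_slice, PySem.Chars.slice_eq_listSlice, PySem.List.slice_to r.toList hk0] at this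
    rw [List.prefix_iff_eq_take, hkN, ← this]
  · rintro ⟨r, hr, hpre⟩
    refine ⟨r, hr, ?_⟩
    have hkN : norm.toList.length = k.toNat := by omega
    rw [← String.toList_inj, PySem.Str.toList_slice, PySem.Chars.slice_eq_listSlice,
      PySem.List.slice_to r.toList hk0]
    rw [List.prefix_iff_eq_take, hkN] at hpre
    exact hpre.symm

-- the two per-code loop bodies agree
set_option maxHeartbeats 2000000 in
theorem pvStepEq (refNorm : List String) (acc : List String) (code : String) :
    (let norm := pvNormalize code
     if norm == "" then acc
     else if PySem.Set.contains refNorm norm then PySem.Set.add acc code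
     else if 3 ≤ PySem.Str.len norm ∧ PySem.Str.len norm ≤ 4 then
       let i := PySem.List.bisectLeft (PySem.List.sorted refNorm (fun x => x) false) norm
       if h : i < (PySem.List.sorted refNorm (fun x => x) false).length then
         if PySem.Str.startswith ((PySem.List.sorted refNorm (fun x => x) false)[i]'h) norm then
           PySem.Set.add acc code
         else acc
       else acc
     else acc)
    =
    (let norm := pvNormalize code
     if !(norm == "") &&
         (PySem.Set.contains refNorm norm
          || (PySem.Str.len norm == 3 &&
              PySem.Set.contains (PySem.Set.ofList (refNorm.map (fun r => PySem.Str.slice r none (some 3)))) norm)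
          || (PySem.Str.len norm == 4 &&
              PySem.Set.contains (PySem.Set.ofList (refNorm.map (fun r => PySem.Str.slice r none (some 4)))) norm)) then
       PySem.Set.add acc code
     else acc) := by
  simp only []
  set norm := pvNormalize code with hnorm
  set S := PySem.List.sorted refNorm (fun x => x) false with hSdef
  set M3 := PySem.Set.contains (PySem.Set.ofList (refNorm.map (fun r => PySem.Str.slice r none (some 3)))) norm with hM3def
  set M4 := PySem.Set.contains (PySem.Set.ofList (refNorm.map (fun r => PySem.Str.slice r none (some 4)))) norm with hM4def
  by_cases h0 : (norm == "") = true
  · simp only [h0, Bool.not_true, Bool.false_and, Bool.false_eq_true, if_false, if_true, if_pos h0]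
  · have h0' : (norm == "") = false := by rwa [Bool.not_eq_true] at h0
    rw [if_neg h0]
    by_cases hc : PySem.Set.contains refNorm norm = true
    · rw [if_pos hc]
      simp only [h0', hc, Bool.not_false, Bool.true_and, Bool.true_or, if_true]
    · have hc' : PySem.Set.contains refNorm norm = false := by rwa [Bool.not_eq_true] at hc
      rw [if_neg hc]
      have hlen : PySem.Str.len norm = (norm.toList.length : Int) := PySem.Str.len_eq norm
      by_cases h3 : norm.toList.length = 3
      · have hA : (3 ≤ PySem.Str.len norm ∧ PySem.Str.len norm ≤ 4) := by rw [hlen, h3]; omega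
        have hL3 : (PySem.Str.len norm == 3) = true := by rw [hlen, h3]; decide
        have hL4 : (PySem.Str.len norm == 4) = false := by rw [hlen, h3]; decide
        rw [if_pos hA]
        by_cases hEx : ∃ r ∈ refNorm, norm.toList <+: r.toList
        · obtain ⟨h, hsw⟩ := (pvHitA_iff refNorm norm).mpr hEx
          have hm3 : M3 = true := (pvMemPref_iff refNorm norm 3 (by omega) (by rw [h3]; rfl)).mpr hEx
          rw [dif_pos h, if_pos hsw]
          simp only [h0', hc', hL3, hL4, hm3, Bool.not_false, Bool.true_and, Bool.false_and,
            Bool.false_or, Bool.or_false, Bool.or_true, Bool.true_or, Bool.and_true, if_true]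
        · have hm3 : M3 = false := by
            rw [← Bool.not_eq_true]
            exact fun hh => hEx ((pvMemPref_iff refNorm norm 3 (by omega) (by rw [h3]; rfl)).mp hh)
          have hRHS : (if (!(norm == "") &&
              (PySem.Set.contains refNorm norm || (PySem.Str.len norm == 3 && M3)
                || (PySem.Str.len norm == 4 && M4))) = true
              then PySem.Set.add acc code else acc) = acc := by
            simp only [h0', hc', hL3, hL4, hm3, Bool.not_false, Bool.true_and, Bool.false_and,
              Bool.and_false, Bool.false_or, Bool.or_false, Bool.false_eq_true, if_false]
          rw [hRHS]
          by_cases h : PySem.List.bisectLeft S norm < S.length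
          · have hsw : PySem.Str.startswith (S[PySem.List.bisectLeft S norm]'h) norm = false := by
              rw [← Bool.not_eq_true]
              exact fun hs => hEx ((pvHitA_iff refNorm norm).mp ⟨h, hs⟩)
            rw [dif_pos h, if_neg (by rw [hsw]; exact Bool.false_ne_true)]
          · rw [dif_neg h]
      · by_cases h4 : norm.toList.length = 4
        · have hA : (3 ≤ PySem.Str.len norm ∧ PySem.Str.len norm ≤ 4) := by rw [hlen, h4]; omega
          have hL3 : (PySem.Str.len norm == 3) = false := by rw [hlen, h4]; decide
          have hL4 : (PySem.Str.len norm == 4) = true := by rw [hlen, h4]; decide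
          rw [if_pos hA]
          by_cases hEx : ∃ r ∈ refNorm, norm.toList <+: r.toList
          · obtain ⟨h, hsw⟩ := (pvHitA_iff refNorm norm).mpr hEx
            have hm4 : M4 = true := (pvMemPref_iff refNorm norm 4 (by omega) (by rw [h4]; rfl)).mpr hEx
            rw [dif_pos h, if_pos hsw]
            simp only [h0', hc', hL3, hL4, hm4, Bool.not_false, Bool.true_and, Bool.false_and,
              Bool.false_or, Bool.or_false, Bool.or_true, Bool.true_or, Bool.and_true, if_true]
          · have hm4 : M4 = false := by
              rw [← Bool.not_eq_true]
              exact fun hh => hEx ((pvMemPref_iff refNorm norm 4 (by omega) (by rw [h4]; rfl)).mp hh)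
            have hRHS : (if (!(norm == "") &&
                (PySem.Set.contains refNorm norm || (PySem.Str.len norm == 3 && M3)
                  || (PySem.Str.len norm == 4 && M4))) = true
                then PySem.Set.add acc code else acc) = acc := by
              simp only [h0', hc', hL3, hL4, hm4, Bool.not_false, Bool.true_and, Bool.false_and,
                Bool.and_false, Bool.false_or, Bool.or_false, Bool.false_eq_true, if_false]
            rw [hRHS]
            by_cases h : PySem.List.bisectLeft S norm < S.length
            · have hsw : PySem.Str.startswith (S[PySem.List.bisectLeft S norm]'h) norm = false := by
                rw [← Bool.not_eq_true]
                exact fun hs => hEx ((pvHitA_iff refNorm norm).mp ⟨h, hs⟩)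
              rw [dif_pos h, if_neg (by rw [hsw]; exact Bool.false_ne_true)]
            · rw [dif_neg h]
        · have hA : ¬ (3 ≤ PySem.Str.len norm ∧ PySem.Str.len norm ≤ 4) := by rw [hlen]; omega
          have hL3 : (PySem.Str.len norm == 3) = false := by
            rw [hlen]
            simp only [beq_eq_false_iff_ne, ne_eq]
            omega
          have hL4 : (PySem.Str.len norm == 4) = false := by
            rw [hlen]
            simp only [beq_eq_false_iff_ne, ne_eq]
            omega
          rw [if_neg hA]
          simp only [h0', hc', hL3, hL4, Bool.not_false, Bool.true_and, Bool.false_and,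
            Bool.false_or, Bool.or_false, Bool.false_eq_true, if_false]

-- ===== VERDICT (by name: the statement is the Claim_ definition above) =====
theorem resolve_icd10_py_spec : Claim_equal_resolve_icd10_py := by
  intro consumer_codes ref_codes _
  unfold Spec_resolve_icd10_py resolve_icd10_py resolve_icd10_py_alt
  have hfold := funext₂ (pvStepEq
    (PySem.Set.ofList (((PySem.Set.ofList ref_codes).filter (fun c => !(c == ""))).map pvNormalize)))
  simp only []
  rw [hfold]
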